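-- pv_equiv track=rewrite | github.com/Kris465/MemoryBox | RPO/block11/task164.py | insert_before_multiples
-- ===== SOURCE A (Python) =====
-- def insert_before_multiples(arr, x, a):
--     i = 0
--     while i < len(arr):
--         if arr[i] % a == 0:
--             arr.insert(i, x)
--             i += 1
--         i += 1
--     return arr
-- ===== SOURCE B (Python) =====
-- def insert_before_multiples(arr, x, a):
--     # Single pass building a fresh output list, then written back into the
--     # same list object (arr[:] = out) so in-place mutation matches A.
--     out = []
--     for v in arr:
--         if v % a == 0:
--             out.append(x)
--         out.append(v)
--     arr[:] = out
--     return arr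
-- ===== Notes on version B (the rewrite author's own statement) =====
-- stated objective: simpler
-- what changed: Replaces A's while-loop that inserts into the list it is indexing (shifting its own index past each insertion) with a single for-pass that builds a fresh output list and writes it back with arr[:] = out; same in-place mutation of the argument.
import Mathlib
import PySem

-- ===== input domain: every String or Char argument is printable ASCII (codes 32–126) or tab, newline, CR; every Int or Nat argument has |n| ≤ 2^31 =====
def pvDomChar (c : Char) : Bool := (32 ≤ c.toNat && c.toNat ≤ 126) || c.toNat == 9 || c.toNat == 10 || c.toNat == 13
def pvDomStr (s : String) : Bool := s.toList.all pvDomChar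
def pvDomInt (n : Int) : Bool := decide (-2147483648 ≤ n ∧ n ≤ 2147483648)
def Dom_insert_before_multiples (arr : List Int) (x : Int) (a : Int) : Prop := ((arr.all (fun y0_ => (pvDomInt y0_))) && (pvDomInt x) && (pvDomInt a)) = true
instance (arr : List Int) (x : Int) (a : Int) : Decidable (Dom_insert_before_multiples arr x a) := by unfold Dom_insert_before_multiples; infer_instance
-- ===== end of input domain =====

-- B builds the output in one pass and writes it back (arr[:] = out) instead of A's
-- index-shifting in-place inserts; both mutate the argument list the same way,
-- and the equivalence proved here is about the returned value.


-- ===== PORT A =====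
-- A's while loop: index i into the very list being mutated; on a hit, insert x
-- at i and skip the shifted element (i += 2), else i += 1.
def pvALoop (x a : Int) (arr : List Int) (i : Nat) : List Int :=
  if h : i < arr.length then
    if PySem.Int.mod arr[i] a = 0 then
      pvALoop x a (PySem.List.insert arr (i : Int) x) (i + 2)
    else
      pvALoop x a arr (i + 1)
  else arr
termination_by arr.length - i
decreasing_by
  · simp [PySem.List.length_insert]; omega
  · omega

def insert_before_multiples (arr : List Int) (x : Int) (a : Int) : List Int :=
  pvALoop x a arr 0

-- ===== PORT B =====
-- B: one pass appending to a fresh accumulator (x before each multiple, then the element).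
def insert_before_multiples_alt (arr : List Int) (x : Int) (a : Int) : List Int :=
  arr.foldl (fun out v => (if PySem.Int.mod v a = 0 then out ++ [x] else out) ++ [v]) []

-- ===== PRECONDITION & SPEC =====
-- Pre_ excludes exactly the inputs where Python A raises ZeroDivisionError:
-- a = 0 with a nonempty list (both A and B raise there).
def Pre_insert_before_multiples (arr : List Int) (x : Int) (a : Int) : Prop :=
  a ≠ 0 ∨ arr = []
instance (arr : List Int) (x : Int) (a : Int) : Decidable (Pre_insert_before_multiples arr x a) := by unfold Pre_insert_before_multiples; infer_instance
def pvWitness_insert_before_multiples : List Int × Int × Int := ([2, 3, 4], 9, 2)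

def Spec_insert_before_multiples (arr : List Int) (x : Int) (a : Int) (out : List Int) : Prop := out = insert_before_multiples_alt arr x a
instance (arr : List Int) (x : Int) (a : Int) (out : List Int) : Decidable (Spec_insert_before_multiples arr x a out) := by unfold Spec_insert_before_multiples; infer_instance

-- ===== CLAIM (what is proved, stated in full; the proofs are below) =====
def Claim_equal_insert_before_multiples : Prop := ∀ (arr : List Int) (x : Int) (a : Int), Dom_insert_before_multiples arr x a → Pre_insert_before_multiples arr x a → Spec_insert_before_multiples arr x a (insert_before_multiples arr x a)

-- ===== LEMMAS AND PROOFS =====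

-- the per-element expansion both programs realise
def pvF (x a : Int) (v : Int) : List Int :=
  if PySem.Int.mod v a = 0 then [x, v] else [v]

theorem pvALoop_eq (x a : Int) : ∀ (n : Nat) (arr : List Int) (i : Nat),
    arr.length - i ≤ n →
    pvALoop x a arr i = arr.take i ++ (arr.drop i).flatMap (pvF x a) := by
  intro n
  induction n with
  | zero =>
    intro arr i hle
    rw [pvALoop]
    have hge : arr.length ≤ i := by omega
    simp [Nat.not_lt.mpr hge, List.drop_eq_nil_of_le hge, List.take_of_length_le hge]
  | succ n ih =>
    intro arr i hle
    rw [pvALoop]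
    by_cases h : i < arr.length
    · have hdrop : arr.drop i = arr[i] :: arr.drop (i + 1) := List.drop_eq_getElem_cons h
      by_cases hm : PySem.Int.mod arr[i] a = 0
      · simp only [h, dif_pos, hm, if_pos]
        have hins : PySem.List.insert arr (i : Int) x = arr.take i ++ x :: arr.drop i :=
          PySem.List.insert_natCast arr i x (by omega)
        rw [hins, ih _ _ (by simp; omega)]
        have hlen : (arr.take i).length = i := List.length_take_of_le (by omega)
        rw [hdrop]
        have htake : (arr.take i ++ x :: arr[i] :: arr.drop (i + 1)).take (i + 2)
            = arr.take i ++ [x, arr[i]] := by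
          rw [show arr.take i ++ x :: arr[i] :: arr.drop (i + 1)
              = (arr.take i ++ [x, arr[i]]) ++ arr.drop (i + 1) by simp]
          exact List.take_left' (by simp [hlen])
        have hdrop2 : (arr.take i ++ x :: arr[i] :: arr.drop (i + 1)).drop (i + 2)
            = arr.drop (i + 1) := by
          rw [show arr.take i ++ x :: arr[i] :: arr.drop (i + 1)
              = (arr.take i ++ [x, arr[i]]) ++ arr.drop (i + 1) by simp]
          exact List.drop_left' (by simp [hlen])
        rw [htake, hdrop2, List.flatMap_cons, pvF, if_pos hm]
        simp
      · simp only [h, dif_pos, hm, if_neg, not_false_iff]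
        rw [ih _ _ (by omega), hdrop]
        have htake1 : arr.take (i + 1) = arr.take i ++ [arr[i]] :=
          List.take_succ_eq_append_getElem h
        rw [htake1, List.flatMap_cons, pvF, if_neg hm, List.append_assoc]
    · simp only [h, dif_neg, not_false_iff]
      have hge : arr.length ≤ i := by omega
      simp [List.drop_eq_nil_of_le hge, List.take_of_length_le hge]

theorem pvAlt_eq (arr : List Int) (x a : Int) :
    insert_before_multiples_alt arr x a = arr.flatMap (pvF x a) := by
  unfold insert_before_multiples_alt
  have hfun : (fun (out : List Int) v => (if PySem.Int.mod v a = 0 then out ++ [x] else out) ++ [v])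
      = fun out v => out ++ pvF x a v := by
    funext out v
    by_cases hm : PySem.Int.mod v a = 0 <;> simp [pvF, hm]
  rw [hfun, PySem.List.foldl_append_eq_flatMap]
  simp

-- ===== VERDICT (by name: the statement is the Claim_ definition above) =====
theorem insert_before_multiples_spec : Claim_equal_insert_before_multiples := by
  intro arr x a _ _
  unfold Spec_insert_before_multiples insert_before_multiples
  rw [pvAlt_eq, pvALoop_eq x a arr.length arr 0 (by omega)]
  simp
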